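-- pv_equiv track=rewrite | github.com/trace86/jhu-aai | AlphaToe/state_mapping/mapping_old.py | vertical_up_search
-- ===== SOURCE A (Python) =====
-- def vertical_up_search(i, j, matrix, num_neighbors, symbol):
--     min_i = 0
--     min_j = 0
--     max_i = len(matrix) - 1
--     max_j = len(matrix[0]) - 1
--
--     xs = []
--     for n in range(1, num_neighbors + 1):
--         _i = i - n
--         _j = j
--         if _i >= min_i and _j >= min_j and _i <= max_i and _j <= max_j:
--             xs.append(matrix[_i][_j])
--     if len(xs) != num_neighbors:
--         return False
--     return all(item == symbol for item in xs)
-- ===== SOURCE B (Python) =====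
-- def vertical_up_search(i, j, matrix, num_neighbors, symbol):
--     width = len(matrix[0])
--     if num_neighbors <= 0:
--         return num_neighbors == 0
--     if i - num_neighbors < 0 or i > len(matrix) or j < 0 or j >= width:
--         return False
--     return [row[j] for row in matrix[i - num_neighbors:i]] == [symbol] * num_neighbors
-- ===== Notes on version B (the rewrite author's own statement) =====
-- stated objective: alternative
-- what changed: B replaces A's per-cell filter-collect-count loop by a closed-form window feasibility test, a slice of the row window projected onto column j, and a structural list equality against the replicated [symbol]*num_neighbors list.
import Mathlib
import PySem

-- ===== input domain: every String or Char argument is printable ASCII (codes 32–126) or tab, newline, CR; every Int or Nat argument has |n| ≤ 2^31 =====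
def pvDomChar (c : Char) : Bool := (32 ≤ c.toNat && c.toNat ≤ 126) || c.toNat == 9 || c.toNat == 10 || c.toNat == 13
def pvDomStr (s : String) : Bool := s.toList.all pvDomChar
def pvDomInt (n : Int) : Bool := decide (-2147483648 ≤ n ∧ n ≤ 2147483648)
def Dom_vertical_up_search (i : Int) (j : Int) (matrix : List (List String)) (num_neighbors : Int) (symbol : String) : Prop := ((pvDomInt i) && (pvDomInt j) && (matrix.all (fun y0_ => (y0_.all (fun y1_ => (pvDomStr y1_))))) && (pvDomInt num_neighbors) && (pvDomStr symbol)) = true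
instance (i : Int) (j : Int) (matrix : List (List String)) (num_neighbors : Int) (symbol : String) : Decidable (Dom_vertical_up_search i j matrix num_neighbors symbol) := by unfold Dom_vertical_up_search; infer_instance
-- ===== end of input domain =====

-- B: closed-form window feasibility, then the column window is sliced out as a list and compared
-- structurally with the replicated [symbol]*num_neighbors list (objective: alternative).

-- ===== PORT A =====
def vertical_up_search (i : Int) (j : Int) (matrix : List (List String)) (num_neighbors : Int) (symbol : String) : Bool :=
  let max_i : Int := (matrix.length : Int) - 1
  let max_j : Int := (matrix.headI.length : Int) - 1
  let xs : List String :=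
    (PySem.List.pyRange 1 (num_neighbors + 1) 1).foldl (fun xs n =>
      let _i := i - n
      let _j := j
      if _i ≥ 0 ∧ _j ≥ 0 ∧ _i ≤ max_i ∧ _j ≤ max_j then
        xs ++ [PySem.List.pyGetD (PySem.List.pyGetD matrix _i []) _j ""]
      else xs) []
  if (xs.length : Int) ≠ num_neighbors then false
  else xs.all (fun item => item == symbol)

-- ===== PORT B =====
def vertical_up_search_alt (i : Int) (j : Int) (matrix : List (List String)) (num_neighbors : Int) (symbol : String) : Bool :=
  let width : Int := (matrix.headI.length : Int)
  if num_neighbors ≤ 0 then num_neighbors == 0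
  else if i - num_neighbors < 0 ∨ i > (matrix.length : Int) ∨ j < 0 ∨ j ≥ width then false
  else
    ((PySem.List.slice matrix (some (i - num_neighbors)) (some i)).map
        (fun row => PySem.List.pyGetD row j ""))
      == List.replicate num_neighbors.toNat symbol

-- ===== PRECONDITION & SPEC =====
-- Pre_ excludes exactly the inputs on which A raises IndexError: the empty matrix
-- (len(matrix[0])), and ragged matrices where an in-bounds cell A reads lies beyond its row.
def Pre_vertical_up_search (i : Int) (j : Int) (matrix : List (List String)) (num_neighbors : Int) (symbol : String) : Prop :=
  matrix ≠ [] ∧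
  ∀ r ∈ List.range matrix.length,
    (i - num_neighbors ≤ (r : Int) ∧ (r : Int) < i ∧ 0 ≤ j ∧ j ≤ (matrix.headI.length : Int) - 1) →
      j < ((matrix.getD r []).length : Int)
instance (i : Int) (j : Int) (matrix : List (List String)) (num_neighbors : Int) (symbol : String) : Decidable (Pre_vertical_up_search i j matrix num_neighbors symbol) := by unfold Pre_vertical_up_search; infer_instance

def pvWitness_vertical_up_search : Int × Int × List (List String) × Int × String :=
  (2, 0, [["a"], ["a"], ["b"]], 2, "a")

def Spec_vertical_up_search (i : Int) (j : Int) (matrix : List (List String)) (num_neighbors : Int) (symbol : String) (out : Bool) : Prop := out = vertical_up_search_alt i j matrix num_neighbors symbol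
instance (i : Int) (j : Int) (matrix : List (List String)) (num_neighbors : Int) (symbol : String) (out : Bool) : Decidable (Spec_vertical_up_search i j matrix num_neighbors symbol out) := by unfold Spec_vertical_up_search; infer_instance

-- ===== CLAIM (what is proved, stated in full; the proofs are below) =====
def Claim_equal_vertical_up_search : Prop := ∀ (i : Int) (j : Int) (matrix : List (List String)) (num_neighbors : Int) (symbol : String), Dom_vertical_up_search i j matrix num_neighbors symbol → Pre_vertical_up_search i j matrix num_neighbors symbol → Spec_vertical_up_search i j matrix num_neighbors symbol (vertical_up_search i j matrix num_neighbors symbol)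
-- ===== LEMMAS AND PROOFS =====

-- ===== VERDICT (by name: the statement is the Claim_ definition above) =====
theorem vertical_up_search_spec : Claim_equal_vertical_up_search := by
  intro i j matrix nn symbol _dom hpre
  obtain ⟨hne, _⟩ := hpre
  unfold Spec_vertical_up_search
  simp only [vertical_up_search, vertical_up_search_alt]
  have H := PySem.List.foldl_append_if
      (fun n : Int => decide (i - n ≥ 0 ∧ j ≥ 0 ∧ i - n ≤ (matrix.length : Int) - 1 ∧
        j ≤ (matrix.headI.length : Int) - 1))
      (fun n : Int => PySem.List.pyGetD (PySem.List.pyGetD matrix (i - n) []) j "")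
      (PySem.List.pyRange 1 (nn + 1) 1) []
  simp only [decide_eq_true_eq, List.nil_append] at H
  rw [H]
  rcases lt_trichotomy nn 0 with hlt | heq | hgt
  · rw [PySem.List.pyRange_one_eq_nil (by omega : nn + 1 ≤ 1)]
    simp only [List.filter_nil, List.map_nil, List.length_nil, Nat.cast_zero]
    rw [if_pos (by omega), if_pos (by omega)]
    simp [show nn ≠ 0 from by omega]
  · subst heq
    rw [PySem.List.pyRange_one_eq_nil (by omega : (0 : Int) + 1 ≤ 1)]
    simp
  · rw [if_neg (by omega : ¬ nn ≤ 0)]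
    by_cases hw : i - nn ≥ 0 ∧ i - 1 ≤ (matrix.length : Int) - 1 ∧ 0 ≤ j ∧
        j ≤ (matrix.headI.length : Int) - 1
    · -- window fully in bounds: both sides test the same cells
      have hfil : (PySem.List.pyRange 1 (nn + 1) 1).filter
          (fun n : Int => decide (i - n ≥ 0 ∧ j ≥ 0 ∧ i - n ≤ (matrix.length : Int) - 1 ∧
            j ≤ (matrix.headI.length : Int) - 1)) = PySem.List.pyRange 1 (nn + 1) 1 := by
        apply List.filter_eq_self.mpr
        intro n hn
        rw [PySem.List.mem_pyRange_one] at hn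
        simp only [decide_eq_true_eq]
        omega
      rw [hfil]
      have hlen : ((((PySem.List.pyRange 1 (nn + 1) 1).map
          (fun n : Int => PySem.List.pyGetD (PySem.List.pyGetD matrix (i - n) []) j "")).length : Int)) = nn := by
        rw [List.length_map, PySem.List.length_pyRange_one]
        omega
      rw [if_neg (by omega), if_neg (by omega)]
      -- B's slice as drop/take
      rw [PySem.List.slice_toNat matrix (by omega) (by omega)]
      set a : Nat := (i - nn).toNat with ha
      have haI : (a : Int) = i - nn := by omega
      have hkI : ((i.toNat - a : Nat) : Int) = nn := by omega
      have hlenmat : a + (i.toNat - a) ≤ matrix.length := by omega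
      rw [Bool.eq_iff_iff]
      simp only [List.all_map, List.all_eq_true, PySem.List.mem_pyRange_one, Function.comp,
        beq_iff_eq]
      constructor
      · intro h
        apply List.eq_replicate_iff.mpr
        constructor
        · simp only [List.length_map, List.length_take, List.length_drop]
          omega
        · intro b hb
          obtain ⟨row, hrow, hbe⟩ := List.mem_map.mp hb
          obtain ⟨k, hk, hget⟩ := List.mem_iff_getElem.mp hrow
          have hk' : k < i.toNat - a := by
            have := hk
            simp only [List.length_take, List.length_drop] at this
            omega
          have hrowval : row = matrix[a + k]'(by omega) := by
            rw [← hget]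
            rw [List.getElem_take, List.getElem_drop]
          have hcell := h (i - ((a:Int) + k)) ⟨by omega, by omega⟩
          rw [show i - (i - ((a:Int) + k)) = (a:Int) + k from by ring] at hcell
          rw [← hbe, hrowval]
          rw [← hcell]
          congr 1
          rw [PySem.List.pyGetD_eq_getElem _ _ (by omega) (by omega)]
          simp only [show ((a:Int) + (k:Int)).toNat = a + k from by omega]
      · intro h n h1
        obtain ⟨h1, h2⟩ := h1
        have hrep := List.eq_replicate_iff.mp h
        have hmem : PySem.List.pyGetD (PySem.List.pyGetD matrix (i - n) []) j "" ∈
            ((matrix.drop a).take (i.toNat - a)).map (fun row => PySem.List.pyGetD row j "") := by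
          apply List.mem_map.mpr
          refine ⟨matrix[(i - n).toNat]'(by omega), ?_, ?_⟩
          · apply List.mem_iff_getElem.mpr
            refine ⟨(i - n).toNat - a, by simp only [List.length_take, List.length_drop]; omega, ?_⟩
            rw [List.getElem_take, List.getElem_drop]
            congr 1
            omega
          · congr 1
            rw [PySem.List.pyGetD_eq_getElem _ _ (by omega) (by omega)]
        exact hrep.2 _ hmem
    · -- window not fully in bounds: A collects too few cells, B fails the arithmetic check
      rw [if_pos (by omega : i - nn < 0 ∨ i > (matrix.length : Int) ∨ j < 0 ∨
        j ≥ (matrix.headI.length : Int))]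
      have hex : ∃ n0 ∈ PySem.List.pyRange 1 (nn + 1) 1,
          decide (i - n0 ≥ 0 ∧ j ≥ 0 ∧ i - n0 ≤ (matrix.length : Int) - 1 ∧
            j ≤ (matrix.headI.length : Int) - 1) = false := by
        by_cases h1 : 0 ≤ i - nn
        · refine ⟨1, PySem.List.mem_pyRange_one.mpr (by omega), ?_⟩
          simp only [decide_eq_false_iff_not]
          rintro ⟨ha, hb, hc, hd⟩
          exact hw ⟨h1, hc, hb, hd⟩
        · refine ⟨nn, PySem.List.mem_pyRange_one.mpr (by omega), ?_⟩
          simp only [decide_eq_false_iff_not]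
          rintro ⟨ha, -, -, -⟩
          omega
      obtain ⟨n0, hn0mem, hn0p⟩ := hex
      have hsub := List.filter_sublist
        (p := fun n : Int => decide (i - n ≥ 0 ∧ j ≥ 0 ∧ i - n ≤ (matrix.length : Int) - 1 ∧
          j ≤ (matrix.headI.length : Int) - 1)) (l := PySem.List.pyRange 1 (nn + 1) 1)
      have hlt2 : ((PySem.List.pyRange 1 (nn + 1) 1).filter
          (fun n : Int => decide (i - n ≥ 0 ∧ j ≥ 0 ∧ i - n ≤ (matrix.length : Int) - 1 ∧
            j ≤ (matrix.headI.length : Int) - 1))).length < (PySem.List.pyRange 1 (nn + 1) 1).length := by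
        refine lt_of_le_of_ne hsub.length_le (fun hEq => ?_)
        have heq2 := hsub.eq_of_length hEq
        have h3 := List.of_mem_filter (heq2 ▸ hn0mem)
        simp only [decide_eq_true_eq] at h3
        simp only [decide_eq_false_iff_not] at hn0p
        exact hn0p h3
      have hll := PySem.List.length_pyRange_one 1 (nn + 1)
      rw [if_pos (by rw [List.length_map]; omega)]
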